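-- pv_equiv track=rewrite | github.com/Caddotta/Python-Demonstrations | Hawaii Translation.py | pronounce
-- ===== SOURCE A (Python) =====
-- vowels_dictionary = {'a':'ah','e':'eh','i':'ee','o':'oh','u':'oo'}
--
-- pairs_dictionary = {
-- 'ai':'eye','ae':'eye','ao':'ow','au':'ow',
-- 'ei':'ay','eu':'eh-oo',
-- 'iu':'ew',
-- 'oi':'oyo','ou': 'ow',
-- 'iw':'ee-v','ew':'eh-v',
-- 'ui':'ooey',}
--
-- def pronounce(word):
--     word=word.lower()
--     i=0
--     result=[]
--     while i < len(word):
--         j=word[i]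
--         if i < len(word)-1:
--             pair=j+word[i+1]
--             k=pairs_dictionary.get(pair)
--             if k is None:
--                 k=vowels_dictionary.get(j)
--             else:
--                 i+=1
--         else:
--             k=vowels_dictionary.get(j)
--         if (k is not None) and (i < len(word)-1):
--             k=k+'-'
--         result.append(k or j)
--         i+=1
--     return ''.join(result)
-- ===== SOURCE B (Python) =====
-- vowels_dictionary = {'a':'ah','e':'eh','i':'ee','o':'oh','u':'oo'}
--
-- pairs_dictionary = {
-- 'ai':'eye','ae':'eye','ao':'ow','au':'ow',
-- 'ei':'ay','eu':'eh-oo',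
-- 'iu':'ew',
-- 'oi':'oyo','ou': 'ow',
-- 'iw':'ee-v','ew':'eh-v',
-- 'ui':'ooey',}
--
-- def pronounce(word):
--     # Online state machine: one-character lookbehind buffer `pending`,
--     # `sep` = "last emitted piece was a recognized sound" (drives a leading '-').
--     out = []
--     pending = None
--     sep = False
--
--     def emit(text, trans):
--         nonlocal sep
--         if sep:
--             out.append('-')
--         if trans is None:
--             out.append(text)
--             sep = False
--         else:
--             out.append(trans)
--             sep = True
--
--     for c in word.lower():
--         if pending is not None and pending + c in pairs_dictionary:
--             emit(pending + c, pairs_dictionary[pending + c])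
--             pending = None
--         else:
--             if pending is not None:
--                 emit(pending, vowels_dictionary.get(pending))
--             pending = c
--     if pending is not None:
--         emit(pending, vowels_dictionary.get(pending))
--     return ''.join(out)
-- ===== Notes on version B (the rewrite author's own statement) =====
-- stated objective: alternative
-- what changed: A's index-based while-loop with explicit lookahead (word[i+1], i mutated inside the body, hyphen patched onto k before appending) is replaced by an online one-pass state machine: a for-loop over characters with a one-character lookbehind buffer and a separator flag, emitting a '-' before a token whenever the previously emitted token was a recognized sound.
import Mathlib
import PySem

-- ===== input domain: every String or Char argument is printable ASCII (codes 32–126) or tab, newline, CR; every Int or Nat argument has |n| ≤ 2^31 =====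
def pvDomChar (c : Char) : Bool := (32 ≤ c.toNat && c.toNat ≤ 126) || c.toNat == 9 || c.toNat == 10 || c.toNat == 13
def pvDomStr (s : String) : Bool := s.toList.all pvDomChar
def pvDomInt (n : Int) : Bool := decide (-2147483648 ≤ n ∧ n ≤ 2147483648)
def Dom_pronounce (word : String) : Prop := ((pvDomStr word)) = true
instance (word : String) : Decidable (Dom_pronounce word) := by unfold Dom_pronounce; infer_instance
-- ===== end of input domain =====

-- B replaces A's index-based lookahead while-loop by an online one-pass state machine with a
-- one-character lookbehind buffer and a separator flag (hyphen emitted BEFORE a token when the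
-- previous token was recognized); objective: alternative, same asymptotic cost.
-- Strings are handled as List Char throughout (PySem convention); ''.join is String.ofList of the
-- concatenated char lists, exact for these ASCII dictionary values.

-- shared module constants (the two Python dicts), as PySem.Dict over List Char keys/values
def vowels_dictionary : PySem.Dict (List Char) (List Char) :=
  PySem.Dict.ofList [(['a'], ['a','h']), (['e'], ['e','h']), (['i'], ['e','e']),
                     (['o'], ['o','h']), (['u'], ['o','o'])]

def pairs_dictionary : PySem.Dict (List Char) (List Char) :=
  PySem.Dict.ofList [(['a','i'], ['e','y','e']), (['a','e'], ['e','y','e']),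
                     (['a','o'], ['o','w']), (['a','u'], ['o','w']),
                     (['e','i'], ['a','y']), (['e','u'], ['e','h','-','o','o']),
                     (['i','u'], ['e','w']), (['o','i'], ['o','y','o']),
                     (['o','u'], ['o','w']), (['i','w'], ['e','e','-','v']),
                     (['e','w'], ['e','h','-','v']), (['u','i'], ['o','o','e','y'])]

-- ===== PORT A =====
-- Python's `k or j` (k an Optional[str]): falls back to j when k is None or empty
def pyOrChars (k : Option (List Char)) (j : List Char) : List Char :=
  match k with
  | some s => if s = [] then j else s
  | none => j

-- A's while loop; the state `i` over word becomes the remaining suffix: `i < len(word)-1` ⇔ rest ≠ []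
def pronounceLoop : List Char → List (List Char)
  | [] => []
  | c :: rest =>
    let j := [c]
    match rest with
    | [] =>
      -- last character: k = vowels.get(j); no hyphen possible
      [pyOrChars (vowels_dictionary.get? j) j]
    | c2 :: rest2 =>
      match pairs_dictionary.get? (j ++ [c2]) with
      | some t =>
        -- pair matched: i += 1 inside, so hyphen iff characters remain after the pair
        (pyOrChars (some (if rest2 = [] then t else t ++ ['-'])) j) :: pronounceLoop rest2
      | none =>
        -- single char, more chars remain: hyphen iff k is not None
        (pyOrChars ((vowels_dictionary.get? j).map (· ++ ['-'])) j) :: pronounceLoop (c2 :: rest2)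

def pronounce (word : String) : String :=
  String.ofList (pronounceLoop (PySem.Str.lower word).toList).flatten

-- ===== PORT B =====
-- B's `emit`: possibly a leading '-', then the translation (sep := true) or the raw text (sep := false)
def emitB (out : List Char) (sep : Bool) (text : List Char) (tr? : Option (List Char)) :
    List Char × Bool :=
  let out := if sep then out ++ ['-'] else out
  match tr? with
  | none => (out ++ text, false)
  | some t => (out ++ t, true)

-- B's loop body: state (pending lookbehind char, emitted chars, separator flag)
def stepB : (Option Char × List Char × Bool) → Char → (Option Char × List Char × Bool)
  | (some p, out, sep), c =>
    match pairs_dictionary.get? [p, c] with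
    | some t => (none, emitB out sep [p, c] (some t))
    | none =>
      let (out', sep') := emitB out sep [p] (vowels_dictionary.get? [p])
      (some c, out', sep')
  | (none, out, sep), c => (some c, out, sep)

-- B's final flush of the pending character
def flushB : (Option Char × List Char × Bool) → List Char
  | (none, out, _) => out
  | (some p, out, sep) => (emitB out sep [p] (vowels_dictionary.get? [p])).1

def pronounce_alt (word : String) : String :=
  String.ofList (flushB ((PySem.Str.lower word).toList.foldl stepB (none, [], false)))

-- ===== PRECONDITION & SPEC =====
def Spec_pronounce (word : String) (out : String) : Prop := out = pronounce_alt word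
instance (word : String) (out : String) : Decidable (Spec_pronounce word out) := by unfold Spec_pronounce; infer_instance

-- ===== CLAIM (what is proved, stated in full; the proofs are below) =====
def Claim_equal_pronounce : Prop := ∀ (word : String), Dom_pronounce word → Spec_pronounce word (pronounce word)

-- ===== LEMMAS AND PROOFS =====

-- proof-internal middle ground: greedy token list and its two renderings
def tokenize : List Char → List (List Char × Option (List Char))
  | [] => []
  | [c] => [([c], vowels_dictionary.get? [c])]
  | c1 :: c2 :: rest =>
    match pairs_dictionary.get? [c1, c2] with
    | some t => ([c1, c2], some t) :: tokenize rest
    | none => ([c1], vowels_dictionary.get? [c1]) :: tokenize (c2 :: rest)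

-- trailing-hyphen rendering (A's shape: '-' after each recognized token except the last)
def render : List (List Char × Option (List Char)) → List Char
  | [] => []
  | (text, tr?) :: rest =>
    (match tr? with
     | none => text
     | some tr => if rest = [] then tr else tr ++ ['-']) ++ render rest

-- leading-hyphen rendering (B's shape: '-' before a token when the previous one was recognized)
def renderL (sep : Bool) : List (List Char × Option (List Char)) → List Char
  | [] => []
  | (text, none) :: rest => (if sep then ['-'] else []) ++ text ++ renderL false rest
  | (_, some t) :: rest => (if sep then ['-'] else []) ++ t ++ renderL true rest

lemma vowels_get_ne_nil (k v : List Char) (h : vowels_dictionary.get? k = some v) : v ≠ [] := by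
  have h2 := PySem.Dict.mem_items_of_get?_eq_some vowels_dictionary h
  rw [show vowels_dictionary.items = [(['a'], ['a','h']), (['e'], ['e','h']), (['i'], ['e','e']),
        (['o'], ['o','h']), (['u'], ['o','o'])] from by decide] at h2
  simp only [List.mem_cons, Prod.mk.injEq, List.not_mem_nil, or_false] at h2
  rcases h2 with ⟨-,rfl⟩|⟨-,rfl⟩|⟨-,rfl⟩|⟨-,rfl⟩|⟨-,rfl⟩ <;> simp

lemma pairs_get_ne_nil (k v : List Char) (h : pairs_dictionary.get? k = some v) : v ≠ [] := by
  have h2 := PySem.Dict.mem_items_of_get?_eq_some pairs_dictionary h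
  rw [show pairs_dictionary.items = [(['a','i'], ['e','y','e']), (['a','e'], ['e','y','e']),
        (['a','o'], ['o','w']), (['a','u'], ['o','w']), (['e','i'], ['a','y']),
        (['e','u'], ['e','h','-','o','o']), (['i','u'], ['e','w']), (['o','i'], ['o','y','o']),
        (['o','u'], ['o','w']), (['i','w'], ['e','e','-','v']), (['e','w'], ['e','h','-','v']),
        (['u','i'], ['o','o','e','y'])] from by decide] at h2
  simp only [List.mem_cons, Prod.mk.injEq, List.not_mem_nil, or_false] at h2
  rcases h2 with ⟨-,rfl⟩|⟨-,rfl⟩|⟨-,rfl⟩|⟨-,rfl⟩|⟨-,rfl⟩|⟨-,rfl⟩|⟨-,rfl⟩|⟨-,rfl⟩|⟨-,rfl⟩|⟨-,rfl⟩|⟨-,rfl⟩|⟨-,rfl⟩ <;> simp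

lemma tokenize_eq_nil_iff (cs : List Char) : tokenize cs = [] ↔ cs = [] := by
  match cs with
  | [] => simp [tokenize]
  | [c] => simp [tokenize]
  | c1 :: c2 :: rest =>
    simp only [tokenize]
    cases pairs_dictionary.get? [c1, c2] <;> simp

-- A's pieces flatten to the trailing-hyphen rendering of the token list
lemma flatten_loop_eq_render (cs : List Char) :
    (pronounceLoop cs).flatten = render (tokenize cs) := by
  induction cs using tokenize.induct with
  | case1 => simp [pronounceLoop, tokenize, render]
  | case2 c =>
    simp only [pronounceLoop, tokenize, render, List.flatten, List.append_nil]
    cases h : vowels_dictionary.get? [c] with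
    | none => simp [pyOrChars]
    | some v => simp [pyOrChars, vowels_get_ne_nil _ _ h]
  | case3 c1 c2 rest t hget ih =>
    simp only [pronounceLoop, List.singleton_append, hget, tokenize, render,
      List.flatten_cons, ih, tokenize_eq_nil_iff]
    congr 1
    split_ifs with h
    · simp [pyOrChars, pairs_get_ne_nil _ _ hget]
    · simp [pyOrChars]
  | case4 c1 c2 rest hget ih =>
    simp only [pronounceLoop, List.singleton_append, hget, tokenize, render,
      List.flatten_cons, ih]
    congr 1
    cases h : vowels_dictionary.get? [c1] with
    | none => simp [pyOrChars]
    | some v => simp [pyOrChars, tokenize_eq_nil_iff]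

-- the two hyphen conventions render the same string
lemma render_eq_renderL (toks : List (List Char × Option (List Char))) :
    render toks = renderL false toks := by
  induction toks with
  | nil => rfl
  | cons t rest ih =>
    obtain ⟨text, tr?⟩ := t
    cases tr? with
    | none => simp [render, renderL, ih]
    | some tr =>
      cases rest with
      | nil => simp [render, renderL]
      | cons t2 rest2 =>
        obtain ⟨text2, tr2?⟩ := t2
        cases tr2? <;> simp_all [render, renderL]

-- B's fold, started with a pending character, computes the leading-hyphen rendering
lemma fold_some : ∀ (n : Nat) (cs : List Char) (p : Char) (out : List Char) (sep : Bool),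
    cs.length ≤ n →
    flushB (cs.foldl stepB (some p, out, sep)) = out ++ renderL sep (tokenize (p :: cs)) := by
  intro n
  induction n with
  | zero =>
    intro cs p out sep h
    have : cs = [] := by cases cs <;> simp_all
    subst this
    simp only [List.foldl_nil, flushB, tokenize]
    cases h : vowels_dictionary.get? [p] <;> simp [emitB, renderL] <;> cases sep <;> simp
  | succ n ih =>
    intro cs p out sep h
    cases cs with
    | nil =>
      simp only [List.foldl_nil, flushB, tokenize]
      cases h : vowels_dictionary.get? [p] <;> simp [emitB, renderL] <;> cases sep <;> simp
    | cons c rest =>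
      simp only [List.foldl_cons, stepB]
      cases hp : pairs_dictionary.get? [p, c] with
      | some t =>
        simp only [tokenize, hp, renderL, emitB]
        cases rest with
        | nil =>
          simp only [List.foldl_nil, flushB, tokenize, renderL]
          cases sep <;> simp
        | cons c2 rest2 =>
          have h2 : rest2.length ≤ n := by simp at h; omega
          simp only [List.foldl_cons, stepB, ih rest2 c2 _ _ h2]
          cases sep <;> simp
      | none =>
        have h1 : rest.length ≤ n := by simp at h; omega
        simp only [tokenize, hp, emitB]
        cases hv : vowels_dictionary.get? [p] with
        | none =>
          simp only [ih rest c _ _ h1, renderL]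
          cases sep <;> simp
        | some v =>
          simp only [ih rest c _ _ h1, renderL]
          cases sep <;> simp

-- ===== VERDICT (by name: the statement is the Claim_ definition above) =====
theorem pronounce_spec : Claim_equal_pronounce := by
  intro word _
  unfold Spec_pronounce pronounce pronounce_alt
  rw [flatten_loop_eq_render]
  cases hcs : (PySem.Str.lower word).toList with
  | nil => simp [tokenize, render, flushB]
  | cons c rest =>
    simp only [List.foldl_cons, stepB, fold_some rest.length rest c [] false le_rfl,
      List.nil_append, render_eq_renderL]
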